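-- pv_equiv track=rewrite | github.com/Riik/liturgie_download | liturgy/preprocessor.py | filter_content
-- ===== SOURCE A (Python) =====
-- def filter_content(content: str) -> str:
--     """ Remove all lines up to and including the line containing 'liturgie' (case insensitive)
--     And remove all lines from the line containing 'Rooster' or 'Vragen'"""
--     content_lines = content.split('\n')
--     filtered_with_header = []
--     filtered_liturgy_only = []
--     liturgy_section = False
--     for ln in content_lines:
--         if any([ln.strip().lower().startswith(keyword) for keyword in
--                   ["rooster", "vragen", "gespreksvragen", "bespreekvragen", "houd me op de hoogte"]]):
--                 break
--         filtered_with_header.append(ln)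
--         if not liturgy_section:
--             liturgy_section = "liturgie" in ln.lower()
--         else:
--             if "youtube" in ln.lower():
--                 break
--             filtered_liturgy_only.append(ln)
--     if not liturgy_section:
--         return '\n'.join(filtered_with_header)
--     return '\n'.join(filtered_liturgy_only)
-- ===== SOURCE B (Python) =====
-- STOP_KEYWORDS = ("rooster", "vragen", "gespreksvragen", "bespreekvragen",
--                  "houd me op de hoogte")
--
--
-- def filter_content(content: str) -> str:
--     """Boundary-index formulation: truncate at the first stop-keyword line,
--     locate the 'liturgie' line, then slice up to the first 'youtube' line."""
--     lines = content.split('\n')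
--     stop = next((i for i, ln in enumerate(lines)
--                  if ln.strip().lower().startswith(STOP_KEYWORDS)), len(lines))
--     lines = lines[:stop]
--     lit = next((i for i, ln in enumerate(lines)
--                 if "liturgie" in ln.lower()), None)
--     if lit is None:
--         return '\n'.join(lines)
--     body = lines[lit + 1:]
--     yt = next((i for i, ln in enumerate(body)
--                if "youtube" in ln.lower()), len(body))
--     return '\n'.join(body[:yt])
-- ===== Notes on version B (the rewrite author's own statement) =====
-- stated objective: simpler
-- what changed: Replaced A's single flag-carrying loop with two growing accumulators by three boundary computations: truncate at the first stop-keyword line, find the 'liturgie' line, slice the lines after it up to the first 'youtube' line.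
import Mathlib
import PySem

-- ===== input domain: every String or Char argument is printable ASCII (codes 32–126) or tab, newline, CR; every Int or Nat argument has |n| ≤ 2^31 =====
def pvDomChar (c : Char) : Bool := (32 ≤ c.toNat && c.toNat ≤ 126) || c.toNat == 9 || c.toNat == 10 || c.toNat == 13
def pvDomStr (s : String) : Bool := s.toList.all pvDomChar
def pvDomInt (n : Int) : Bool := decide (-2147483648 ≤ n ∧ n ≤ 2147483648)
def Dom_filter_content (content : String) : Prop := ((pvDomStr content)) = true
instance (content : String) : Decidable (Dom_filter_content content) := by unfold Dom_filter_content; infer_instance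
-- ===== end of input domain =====

-- B replaces A's flag-carrying single loop with boundary indices: truncate at the first
-- stop-keyword line, find the 'liturgie' line, slice up to the first 'youtube' line (objective: simpler).

-- ===== PORT A =====
-- shared line predicates (used verbatim by both Pythons)
def pvStopLine (ln : String) : Bool :=
  (["rooster", "vragen", "gespreksvragen", "bespreekvragen", "houd me op de hoogte"]).any
    (fun kw => PySem.Str.startswith (PySem.Str.lower (PySem.Str.strip ln)) kw)

def pvLitLine (ln : String) : Bool := PySem.Str.isIn "liturgie" (PySem.Str.lower ln)

def pvYtLine (ln : String) : Bool := PySem.Str.isIn "youtube" (PySem.Str.lower ln)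

-- A's loop: state (filtered_with_header, filtered_liturgy_only, liturgy_section); breaks return the state
def filterLoopA : List String → List String → List String → Bool →
    (List String × List String × Bool)
  | [], hdr, body, flag => (hdr, body, flag)
  | ln :: rest, hdr, body, flag =>
    if pvStopLine ln then (hdr, body, flag)
    else if !flag then filterLoopA rest (hdr ++ [ln]) body (pvLitLine ln)
    else if pvYtLine ln then (hdr ++ [ln], body, flag)
    else filterLoopA rest (hdr ++ [ln]) (body ++ [ln]) flag

def filter_content (content : String) : String :=
  let contentLines := (PySem.Str.split? content "\n").getD []
  let res := filterLoopA contentLines [] [] false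
  if !res.2.2 then PySem.Str.join "\n" res.1
  else PySem.Str.join "\n" res.2.1

-- ===== PORT B =====
def filter_content_alt (content : String) : String :=
  let lines0 := (PySem.Str.split? content "\n").getD []
  let stop := (lines0.findIdx? (fun ln => pvStopLine ln)).getD lines0.length
  let lines := lines0.take stop
  match lines.findIdx? (fun ln => pvLitLine ln) with
  | none => PySem.Str.join "\n" lines
  | some lit =>
    let body := lines.drop (lit + 1)
    let yt := (body.findIdx? (fun ln => pvYtLine ln)).getD body.length
    PySem.Str.join "\n" (body.take yt)

-- ===== PRECONDITION & SPEC =====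
def Spec_filter_content (content : String) (out : String) : Prop := out = filter_content_alt content
instance (content : String) (out : String) : Decidable (Spec_filter_content content out) := by unfold Spec_filter_content; infer_instance

-- ===== CLAIM (what is proved, stated in full; the proofs are below) =====
def Claim_equal_filter_content : Prop := ∀ (content : String), Dom_filter_content content → Spec_filter_content content (filter_content content)

-- ===== LEMMAS AND PROOFS =====

-- B's slice-to-first-hit equals takeWhile on the negated predicate
theorem take_findIdx_eq_takeWhile (p : String → Bool) (ls : List String) :
    ls.take ((ls.findIdx? p).getD ls.length) = ls.takeWhile (fun x => !p x) := by
  induction ls with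
  | nil => rfl
  | cons a tl ih =>
    cases hp : p a with
    | true => simp [List.findIdx?_cons, hp]
    | false =>
      simp only [List.findIdx?_cons, hp, List.takeWhile_cons, Bool.not_false, if_true]
      cases h : tl.findIdx? p with
      | none => simpa [h] using congrArg (List.cons a) (by simpa [h] using ih)
      | some i => simpa [h] using congrArg (List.cons a) (by simpa [h] using ih)

-- once liturgy_section is true, A's loop appends takeWhile (¬stop ∧ ¬yt) to body and keeps the flag
theorem filterLoopA_flag_true (ls : List String) : ∀ (hdr body : List String),
    (filterLoopA ls hdr body true).2.1
      = body ++ ls.takeWhile (fun ln => !pvStopLine ln && !pvYtLine ln) ∧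
    (filterLoopA ls hdr body true).2.2 = true := by
  induction ls with
  | nil => intro hdr body; simp [filterLoopA]
  | cons ln rest ih =>
    intro hdr body
    cases hs : pvStopLine ln with
    | true => simp [filterLoopA, hs]
    | false =>
      cases hy : pvYtLine ln with
      | true => simp [filterLoopA, hs, hy]
      | false =>
        simpa [filterLoopA, hs, hy, List.append_assoc] using
          ih (hdr ++ [ln]) (body ++ [ln])

-- two successive takeWhiles = one takeWhile of the conjunction (abstract predicates)
theorem takeWhile_and {α : Type} (p q : α → Bool) (l : List α) :
    (l.takeWhile p).takeWhile q = l.takeWhile (fun x => p x && q x) := by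
  induction l with
  | nil => rfl
  | cons a tl ih =>
    by_cases hp : p a
    · by_cases hq : q a
      · simp [List.takeWhile_cons, hp, ih]
      · simp [List.takeWhile_cons, hp, hq]
    · simp [List.takeWhile_cons, hp]

-- main invariant: A's result from flag = false, body = [] equals B's boundary formula (header prefix h)
theorem filterLoopA_main (ls : List String) : ∀ (h : List String),
    (let res := filterLoopA ls h [] false;
     if !res.2.2 then PySem.Str.join "\n" res.1 else PySem.Str.join "\n" res.2.1)
      = (let t := ls.takeWhile (fun ln => !pvStopLine ln);
         match t.findIdx? (fun ln => pvLitLine ln) with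
         | none => PySem.Str.join "\n" (h ++ t)
         | some lit =>
             PySem.Str.join "\n"
               ((t.drop (lit + 1)).takeWhile (fun ln => !pvYtLine ln))) := by
  induction ls with
  | nil => intro h; simp [filterLoopA]
  | cons ln rest ih =>
    intro h
    cases hs : pvStopLine ln with
    | true => simp [filterLoopA, hs]
    | false =>
      cases hl : pvLitLine ln with
      | true =>
        -- liturgie line: flag flips; body collects until stop-or-yt
        have hflag := filterLoopA_flag_true rest (h ++ [ln]) []
        simp only [filterLoopA, hs, hl, Bool.false_eq_true, if_false, Bool.not_false, if_true,
          List.takeWhile_cons, List.findIdx?_cons, cond_true, Option.getD_some,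
          List.drop_succ_cons, List.drop_zero]
        simp only [hflag.1, hflag.2, List.nil_append, Bool.not_true, Bool.false_eq_true,
          if_false]
        rw [takeWhile_and (fun ln => !pvStopLine ln) (fun ln => !pvYtLine ln)]
      | false =>
        have := ih (h ++ [ln])
        simp only [filterLoopA, hs, hl, Bool.false_eq_true, if_false, Bool.not_false, if_true,
          List.takeWhile_cons, List.findIdx?_cons, cond_false] at this ⊢
        cases hfi : (rest.takeWhile (fun ln => !pvStopLine ln)).findIdx?
            (fun ln => pvLitLine ln) with
        | none => simpa [hfi, List.append_assoc] using this
        | some i => simpa [hfi] using this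

-- ===== VERDICT (by name: the statement is the Claim_ definition above) =====
theorem filter_content_spec : Claim_equal_filter_content := by
  intro content _
  unfold Spec_filter_content filter_content filter_content_alt
  have hmain := filterLoopA_main ((PySem.Str.split? content "\n").getD []) []
  simp only [List.nil_append] at hmain
  rw [hmain]
  dsimp only
  rw [take_findIdx_eq_takeWhile]
  cases hfi : (((PySem.Str.split? content "\n").getD []).takeWhile
      (fun ln => !pvStopLine ln)).findIdx? (fun ln => pvLitLine ln) with
  | none => simp only [hfi]
  | some i =>
    simp only [hfi]
    rw [take_findIdx_eq_takeWhile]
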